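-- pv_equiv track=rewrite | github.com/foundation-models/dockerfiles | src/utility/named_finder.py | check_contained
-- ===== SOURCE A (Python) =====
-- def check_contained(ls):
--     contained = []
--     for l1 in ls:
--         for l2 in ls:
--             if l1 != l2:
--                 if l1 in l2:
--                     contained.append(l1)
--     return contained
-- ===== SOURCE B (Python) =====
-- def check_contained(ls):
--     # Count duplicates once, test substring containment only between distinct
--     # strings, then emit each occurrence's repetitions in one output pass (alternative algorithm).
--     counts = {}
--     for t in ls:
--         counts[t] = counts.get(t, 0) + 1
--     hits = {}
--     for s in counts:
--         n = 0
--         for t, k in counts.items():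
--             if t != s and s in t:
--                 n += k
--         hits[s] = n
--     out = []
--     for s in ls:
--         out += [s] * hits[s]
--     return out
-- ===== Notes on version B (the rewrite author's own statement) =====
-- stated objective: alternative
-- what changed: B deduplicates the input with a count map, runs the quadratic substring scan only over distinct strings, stores a per-string hit count, and emits the output in a single pass; A scans all ordered pairs of list positions (intended as faster; measured 1.79x at n=4096, below the 1.5x-at-largest-size bar, so recorded as 'none').
import Mathlib
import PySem

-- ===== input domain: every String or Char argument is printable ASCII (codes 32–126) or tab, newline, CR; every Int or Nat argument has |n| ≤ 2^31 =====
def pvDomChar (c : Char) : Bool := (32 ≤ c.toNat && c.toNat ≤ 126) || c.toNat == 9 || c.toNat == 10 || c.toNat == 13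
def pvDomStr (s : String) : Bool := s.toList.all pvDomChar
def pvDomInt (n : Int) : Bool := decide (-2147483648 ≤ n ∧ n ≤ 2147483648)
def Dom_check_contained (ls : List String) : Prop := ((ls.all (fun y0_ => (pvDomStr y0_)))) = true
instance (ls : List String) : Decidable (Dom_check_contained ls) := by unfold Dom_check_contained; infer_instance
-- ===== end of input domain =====

-- B deduplicates the input with a count map, runs the substring scan only over
-- distinct strings, and emits the output in one final pass (objective: alternative
-- algorithm; same result everywhere).

-- ===== PORT A =====
def check_contained (ls : List String) : List String :=
  ls.foldl (fun contained l1 =>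
    ls.foldl (fun contained l2 =>
      if l1 ≠ l2 then
        if PySem.Str.isIn l1 l2 then contained ++ [l1] else contained
      else contained) contained) []

-- ===== PORT B =====
def check_contained_alt (ls : List String) : List String :=
  -- counts[t] = counts.get(t, 0) + 1
  let counts : PySem.Dict String Int :=
    ls.foldl (fun d t => d.insert t (d.getD t 0 + 1)) PySem.Dict.empty
  -- for s in counts: hits[s] = sum of k over items (t, k) with t != s and s in t
  let hits : PySem.Dict String Int :=
    counts.keys.foldl (fun h s =>
      h.insert s (counts.items.foldl (fun n p =>
        if p.1 ≠ s ∧ PySem.Str.isIn s p.1 then n + p.2 else n) 0)) PySem.Dict.empty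
  -- out += [s] * hits[s]  (s is always a key of hits, so the default is never used)
  ls.foldl (fun out s => out ++ List.replicate (hits.getD s 0).toNat s) []

-- ===== PRECONDITION & SPEC =====
def Spec_check_contained (ls : List String) (out : List String) : Prop := out = check_contained_alt ls
instance (ls : List String) (out : List String) : Decidable (Spec_check_contained ls out) := by unfold Spec_check_contained; infer_instance

-- ===== CLAIM (what is proved, stated in full; the proofs are below) =====
def Claim_equal_check_contained : Prop := ∀ (ls : List String), Dom_check_contained ls → Spec_check_contained ls (check_contained ls)

-- ===== LEMMAS AND PROOFS =====

-- the predicate both programs test for a pattern s against a text t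
def pvPred (s t : String) : Bool := decide (s ≠ t) && PySem.Str.isIn s t

-- A's inner loop appends l1 once per matching l2: it is a replicate of the match count.
theorem pvA_inner (l1 : String) (ls : List String) (acc : List String) :
    ls.foldl (fun contained l2 =>
      if l1 ≠ l2 then
        if PySem.Str.isIn l1 l2 then contained ++ [l1] else contained
      else contained) acc
      = acc ++ List.replicate (ls.countP (pvPred l1)) l1 := by
  induction ls generalizing acc with
  | nil => simp
  | cons x xs ih =>
    simp only [List.foldl_cons, List.countP_cons, ih, pvPred]
    by_cases h1 : l1 ≠ x
    · by_cases h2 : PySem.Chars.isIn l1.toList x.toList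
      · simp [h1, h2, List.replicate_succ]
      · simp [h1, h2]
    · simp [h1]

-- sum of an indicator over a nodup list containing x
theorem pvSum_indicator (q : String → Bool) (x : String) (u : List String)
    (hu : u.Nodup) (hx : x ∈ u) :
    (u.map (fun t => if q t ∧ t = x then (1 : Int) else 0)).sum
      = if q x then 1 else 0 := by
  induction u with
  | nil => cases hx
  | cons a u ih =>
    rcases List.nodup_cons.mp hu with ⟨ha, hu'⟩
    by_cases hax : a = x
    · subst hax
      have hz : (u.map (fun t => if q t ∧ t = a then (1 : Int) else 0)).sum = 0 := by
        apply List.sum_eq_zero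
        intro y hy
        rcases List.mem_map.mp hy with ⟨t, ht, rfl⟩
        have : ¬ t = a := fun h => ha (h ▸ ht)
        simp [this]
      simp [hz]
    · have hx' : x ∈ u := by
        rcases List.mem_cons.mp hx with h | h
        · exact absurd h.symm hax
        · exact h
      simp [hax, ih hu' hx']

-- summing the multiplicities of the distinct elements satisfying q counts q over ls
theorem pvSum_count (q : String → Bool) (u : List String) (ls : List String)
    (hu : u.Nodup) (hcov : ∀ x ∈ ls, x ∈ u) :
    (u.map (fun t => if q t then (ls.count t : Int) else 0)).sum
      = (ls.countP q : Int) := by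
  induction ls with
  | nil => simp
  | cons x xs ih =>
    have hx : x ∈ u := hcov x (List.mem_cons_self ..)
    have hcov' : ∀ y ∈ xs, y ∈ u := fun y hy => hcov y (List.mem_cons_of_mem _ hy)
    have hsplit : ∀ t : String,
        (if q t then ((x :: xs).count t : Int) else 0)
          = (if q t then (xs.count t : Int) else 0)
            + (if q t ∧ t = x then (1 : Int) else 0) := by
      intro t
      rw [List.count_cons]
      by_cases htx : t = x
      · subst htx
        by_cases hq : q t <;> simp [hq]
      · have hxt : ¬ x = t := fun h => htx h.symm
        by_cases hq : q t <;> simp [hq, htx, hxt]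
    calc (u.map (fun t => if q t then ((x :: xs).count t : Int) else 0)).sum
        = (u.map (fun t => (if q t then (xs.count t : Int) else 0)
            + (if q t ∧ t = x then (1 : Int) else 0))).sum := by
          congr 1; exact List.map_congr_left (fun t _ => hsplit t)
      _ = (xs.countP q : Int) + (if q x then 1 else 0) := by
          rw [List.sum_map_add, ih hcov', pvSum_indicator q x u hu hx]
      _ = ((x :: xs).countP q : Int) := by
          rw [List.countP_cons]
          by_cases hq : q x <;> simp [hq]

-- B's inner loop over the counter's items computes the same match count.
theorem pvB_inner (s : String) (ls : List String) :
    (PySem.Dict.counter ls).items.foldl (fun n p =>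
        if p.1 ≠ s ∧ PySem.Str.isIn s p.1 then n + p.2 else n) 0
      = (ls.countP (pvPred s) : Int) := by
  rw [PySem.Dict.items_counter, List.foldl_map]
  have hcongr : ∀ (n : Int), ∀ t ∈ PySem.Set.ofList ls,
      (if t ≠ s ∧ PySem.Str.isIn s t then n + (ls.count t : Int) else n)
        = n + (if pvPred s t then (ls.count t : Int) else 0) := by
    intro n t _
    unfold pvPred
    by_cases h1 : t ≠ s
    · have h1' : s ≠ t := fun h => h1 h.symm
      by_cases h2 : PySem.Chars.isIn s.toList t.toList <;> simp [h1, h1', h2]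
    · have h1' : ¬ s ≠ t := by
        intro h; exact h1 (fun h' => h h'.symm)
      simp [h1, h1']
  rw [PySem.List.foldl_congr_mem _ _ _ _ hcongr, PySem.List.foldl_add]
  rw [pvSum_count (pvPred s) (PySem.Set.ofList ls) ls (PySem.Set.nodup_ofList ls)
      (fun x hx => (PySem.Set.mem_ofList ls x).mpr hx)]
  simp

-- B's hits dict maps every s in the input to that match count.
theorem pvHits_getD (ls : List String) (s : String) (hs : s ∈ ls) :
    ((PySem.Dict.counter ls).keys.foldl (fun h s =>
      h.insert s ((PySem.Dict.counter ls).items.foldl (fun n p =>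
        if p.1 ≠ s ∧ PySem.Str.isIn s p.1 then n + p.2 else n) 0))
      (PySem.Dict.empty : PySem.Dict String Int)).getD s 0
      = (ls.countP (pvPred s) : Int) := by
  set f : String → Int := fun s =>
    (PySem.Dict.counter ls).items.foldl (fun n p =>
      if p.1 ≠ s ∧ PySem.Str.isIn s p.1 then n + p.2 else n) 0 with hf
  have hitems := PySem.Dict.items_foldl_insert_fresh (PySem.Dict.counter ls).keys
      (fun a => a) f PySem.Dict.empty
      (by intro a _; simp [PySem.Dict.contains_empty])
      (by simp)
  set H := (PySem.Dict.counter ls).keys.foldl (fun h s => h.insert s (f s))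
      (PySem.Dict.empty : PySem.Dict String Int) with hH
  have hitems' : H.items = (PySem.Dict.counter ls).keys.map (fun a => (a, f a)) := by
    simpa using hitems
  have hskey : s ∈ (PySem.Dict.counter ls).keys := by
    rw [PySem.Dict.keys_counter]
    exact (PySem.Set.mem_ofList ls s).mpr hs
  have hmem : (s, f s) ∈ H.items := by
    rw [hitems']; exact List.mem_map.mpr ⟨s, hskey, rfl⟩
  have hnodup : H.keys.Nodup := by
    have hk : H.keys = H.items.map Prod.fst := rfl
    have hid : (List.map (Prod.fst ∘ fun a => (a, f a)) (PySem.Dict.counter ls).keys)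
        = (PySem.Dict.counter ls).keys := List.map_id _
    rw [hk, hitems', List.map_map, hid]
    exact PySem.Dict.nodup_keys_counter ls
  have hget := PySem.Dict.get?_of_mem_items H hmem hnodup
  rw [PySem.Dict.getD_of_get?_eq_some H 0 hget]
  exact pvB_inner s ls

-- ===== VERDICT (by name: the statement is the Claim_ definition above) =====
theorem check_contained_spec : Claim_equal_check_contained := by
  intro ls _
  unfold Spec_check_contained check_contained check_contained_alt
  rw [PySem.Dict.foldl_insert_getD_add_one_eq_counter]
  rw [PySem.List.foldl_congr_mem _ _
        (fun contained l1 => contained ++ List.replicate (ls.countP (pvPred l1)) l1) []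
        (fun acc l1 _ => pvA_inner l1 ls acc)]
  refine (PySem.List.foldl_congr_mem _ _ _ [] ?_).symm
  intro acc s hs
  rw [pvHits_getD ls s hs]
  simp
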